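-- pv_equiv track=rewrite | github.com/JaneliaSciComp/tensorswitch | src/tensorswitch_v2/utils/chunk_utils.py | get_chunk_linear_indices_in_shard
-- ===== SOURCE A (Python) =====
-- import itertools
--
-- def get_chunk_linear_indices_in_shard(shard_coord, shard_shape, chunk_shape, chunk_grid):
--     """
--     Generate linear indices for all chunks within a specific shard.
--     Works for N-dimensional data (2D, 3D, 4D, 5D, etc.).
--
--     Args:
--         shard_coord: N-D shard coordinate (e.g., [z, y, x] for 3D or [c, z, y, x] for 4D)
--         shard_shape: Shape of each shard (e.g., [1024, 1024, 1024])
--         chunk_shape: Shape of each chunk (e.g., [32, 32, 32])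
--         chunk_grid: Total number of chunks in each dimension across entire array
--
--     Returns:
--         list: Linear indices of all chunks within this shard that are within data bounds
--     """
--     # Calculate how many chunks fit in each dimension of the shard
--     chunks_per_shard_dim = [
--         shard_shape[i] // chunk_shape[i]
--         for i in range(len(shard_shape))
--     ]
--
--     # Base chunk coordinate for this shard (where this shard starts in chunk space)
--     base_chunk_coord = [
--         shard_coord[i] * chunks_per_shard_dim[i]
--         for i in range(len(shard_coord))
--     ]
--
--     # Generate all chunk indices within this shard using N-D iteration
--     chunk_indices = []
--     for chunk_offset in itertools.product(*[range(dim) for dim in chunks_per_shard_dim]):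
--         # Calculate absolute chunk coordinate in the array
--         chunk_coord = [
--             base_chunk_coord[i] + chunk_offset[i]
--             for i in range(len(base_chunk_coord))
--         ]
--
--         # Skip if chunk is outside data bounds
--         if any(chunk_coord[i] >= chunk_grid[i] for i in range(len(chunk_coord))):
--             continue
--
--         # Convert N-D chunk coordinate to linear index (row-major order)
--         linear_idx = 0
--         stride = 1
--         for i in range(len(chunk_coord) - 1, -1, -1):
--             linear_idx += chunk_coord[i] * stride
--             stride *= chunk_grid[i]
--
--         chunk_indices.append(linear_idx)
--
--     return chunk_indices
-- ===== SOURCE B (Python) =====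
-- def get_chunk_linear_indices_in_shard(shard_coord, shard_shape, chunk_shape, chunk_grid):
--     # Precompute row-major strides and clamped per-dimension valid counts once, then
--     # build the index list dimension by dimension with no per-chunk bounds filter.
--     cps = [s // c for s, c in zip(shard_shape, chunk_shape)]
--     base = [sc * k for sc, k in zip(shard_coord, cps)]
--
--     # offsets along each dimension that stay inside the grid
--     valid = [min(k, g - b) for k, g, b in zip(cps, chunk_grid, base)]
--     if any(v <= 0 for v in valid):
--         return []
--
--     strides = []
--     acc = 1
--     for g in reversed(chunk_grid):
--         strides.append(acc)
--         acc *= g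
--     strides.reverse()
--
--     out = [sum(b * s for b, s in zip(base, strides))]
--     for v, s in zip(valid, strides):
--         out = [lin + off * s for lin in out for off in range(v)]
--     return out
-- ===== Notes on version B (the rewrite author's own statement) =====
-- stated objective: alternative
-- what changed: Row-major strides and clamped per-dimension valid offset counts are precomputed once and the index list is built dimension by dimension by pure arithmetic (with an early [] when some valid count is non-positive), eliminating itertools.product, the per-chunk bounds filter and the per-chunk stride-recomputation loop; Pre_ excludes inputs where A raises and the length-mismatched corner where both programs' truncation choices are arbitrary.
-- outside the precondition, e.g. on get_chunk_linear_indices_in_shard([0], [2, 2], [1, 1], [5]): A returns [0, 0, 1, 1], B returns [0, 1]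
import Mathlib
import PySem

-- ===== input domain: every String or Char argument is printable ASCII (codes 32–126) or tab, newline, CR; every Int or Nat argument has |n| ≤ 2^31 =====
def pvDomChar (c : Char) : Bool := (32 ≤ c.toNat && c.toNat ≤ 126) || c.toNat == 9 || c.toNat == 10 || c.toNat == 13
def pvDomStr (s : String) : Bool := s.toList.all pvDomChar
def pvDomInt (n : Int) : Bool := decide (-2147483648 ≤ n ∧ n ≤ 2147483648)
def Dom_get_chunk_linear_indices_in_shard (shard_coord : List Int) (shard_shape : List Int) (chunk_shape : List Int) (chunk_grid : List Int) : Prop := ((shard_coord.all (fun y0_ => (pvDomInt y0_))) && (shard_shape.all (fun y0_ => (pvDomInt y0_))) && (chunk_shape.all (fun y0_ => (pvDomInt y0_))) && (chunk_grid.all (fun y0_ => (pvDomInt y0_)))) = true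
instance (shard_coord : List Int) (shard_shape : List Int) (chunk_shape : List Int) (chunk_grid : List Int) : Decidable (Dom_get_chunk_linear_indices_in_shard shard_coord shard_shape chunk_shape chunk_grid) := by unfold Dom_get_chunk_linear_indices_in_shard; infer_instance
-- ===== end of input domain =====

-- B precomputes row-major strides and clamped per-dimension valid offset counts once and builds the
-- index list dimension by dimension, replacing A's itertools.product + per-chunk bounds filter + per-chunk stride loop.


-- ===== PORT A =====
-- itertools.product over a list of lists (row-major), exactly as A consumes it
def pvProduct (rs : List (List Int)) : List (List Int) :=
  match rs with
  | [] => [[]]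
  | r :: rest => r.flatMap (fun x => (pvProduct rest).map (fun t => x :: t))

def get_chunk_linear_indices_in_shard (shard_coord : List Int) (shard_shape : List Int) (chunk_shape : List Int) (chunk_grid : List Int) : List Int :=
  let chunks_per_shard_dim := (PySem.List.pyRange 0 (shard_shape.length : Int)).map
    (fun i => PySem.Int.floordiv (PySem.List.pyGetD shard_shape i 0) (PySem.List.pyGetD chunk_shape i 0))
  let base_chunk_coord := (PySem.List.pyRange 0 (shard_coord.length : Int)).map
    (fun i => PySem.List.pyGetD shard_coord i 0 * PySem.List.pyGetD chunks_per_shard_dim i 0)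
  (pvProduct (chunks_per_shard_dim.map (fun dim => PySem.List.pyRange 0 dim))).foldl
    (fun chunk_indices chunk_offset =>
      let chunk_coord := (PySem.List.pyRange 0 (base_chunk_coord.length : Int)).map
        (fun i => PySem.List.pyGetD base_chunk_coord i 0 + PySem.List.pyGetD chunk_offset i 0)
      if (PySem.List.pyRange 0 (chunk_coord.length : Int)).any
           (fun i => decide (PySem.List.pyGetD chunk_coord i 0 ≥ PySem.List.pyGetD chunk_grid i 0))
      then chunk_indices
      else
        let p := (PySem.List.pyRange ((chunk_coord.length : Int) - 1) (-1) (-1)).foldl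
          (fun (p : Int × Int) i =>
            (p.1 + PySem.List.pyGetD chunk_coord i 0 * p.2,
             p.2 * PySem.List.pyGetD chunk_grid i 0)) (0, 1)
        chunk_indices ++ [p.1])
    []

-- ===== PORT B =====
def get_chunk_linear_indices_in_shard_alt (shard_coord : List Int) (shard_shape : List Int) (chunk_shape : List Int) (chunk_grid : List Int) : List Int :=
  let cps := (shard_shape.zip chunk_shape).map (fun p => PySem.Int.floordiv p.1 p.2)
  let base := (shard_coord.zip cps).map (fun p => p.1 * p.2)
  let valid := (cps.zip (chunk_grid.zip base)).map (fun p => min p.1 (p.2.1 - p.2.2))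
  if valid.any (fun v => decide (v ≤ 0)) then []
  else
    let strides := (chunk_grid.reverse.foldl
        (fun (p : List Int × Int) g => (p.1 ++ [p.2], p.2 * g)) ([], 1)).1.reverse
    let out0 := ((base.zip strides).map (fun p => p.1 * p.2)).sum
    (valid.zip strides).foldl
      (fun out q => out.flatMap (fun lin => (PySem.List.pyRange 0 q.1).map (fun off => lin + off * q.2)))
      [out0]

-- ===== PRECONDITION & SPEC =====
-- Pre_ excludes inputs where Python A raises (a zero chunk_shape entry → ZeroDivisionError; a
-- too-short chunk_shape/chunk_grid or too-long shard_coord → IndexError) and the remaining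
-- length-mismatched inputs, a corner no caller specifies, where which argument's length wins is an
-- arbitrary choice and A (prefix of the dimensions, duplicated indices) and B (zip truncation) choose differently.
def Pre_get_chunk_linear_indices_in_shard (shard_coord : List Int) (shard_shape : List Int) (chunk_shape : List Int) (chunk_grid : List Int) : Prop :=
  shard_coord.length = shard_shape.length ∧ chunk_shape.length = shard_shape.length ∧
  chunk_grid.length = shard_shape.length ∧ ∀ c ∈ chunk_shape, c ≠ 0
instance (shard_coord : List Int) (shard_shape : List Int) (chunk_shape : List Int) (chunk_grid : List Int) : Decidable (Pre_get_chunk_linear_indices_in_shard shard_coord shard_shape chunk_shape chunk_grid) := by unfold Pre_get_chunk_linear_indices_in_shard; infer_instance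

def pvWitness_get_chunk_linear_indices_in_shard : List Int × List Int × List Int × List Int :=
  ([1, 0], [4, 4], [2, 2], [3, 3])

def Spec_get_chunk_linear_indices_in_shard (shard_coord : List Int) (shard_shape : List Int) (chunk_shape : List Int) (chunk_grid : List Int) (out : List Int) : Prop := out = get_chunk_linear_indices_in_shard_alt shard_coord shard_shape chunk_shape chunk_grid
instance (shard_coord : List Int) (shard_shape : List Int) (chunk_shape : List Int) (chunk_grid : List Int) (out : List Int) : Decidable (Spec_get_chunk_linear_indices_in_shard shard_coord shard_shape chunk_shape chunk_grid out) := by unfold Spec_get_chunk_linear_indices_in_shard; infer_instance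

-- ===== CLAIM (what is proved, stated in full; the proofs are below) =====
def Claim_equal_get_chunk_linear_indices_in_shard : Prop := ∀ (shard_coord : List Int) (shard_shape : List Int) (chunk_shape : List Int) (chunk_grid : List Int), Dom_get_chunk_linear_indices_in_shard shard_coord shard_shape chunk_shape chunk_grid → Pre_get_chunk_linear_indices_in_shard shard_coord shard_shape chunk_shape chunk_grid → Spec_get_chunk_linear_indices_in_shard shard_coord shard_shape chunk_shape chunk_grid (get_chunk_linear_indices_in_shard shard_coord shard_shape chunk_shape chunk_grid)

-- ===== LEMMAS AND PROOFS =====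

-- canonical recursive form both ports are reduced to: per dimension, the clamped offset range,
-- emitting (b + x) * (row-major stride) + recursive linear index
def gcore : List Int → List Int → List Int → List Int
  | b :: bs, c :: cs, g :: gs =>
      (PySem.List.pyRange 0 (min c (g - b))).flatMap
        (fun x => (gcore bs cs gs).map (fun l => (b + x) * gs.prod + l))
  | _, _, _ => [0]

-- A's backward (linear_idx, stride) accumulation, on the zipped (coord, grid) list
def pvLin : List (Int × Int) → Int × Int
  | [] => (0, 1)
  | q :: t => ((pvLin t).1 + q.1 * (pvLin t).2, (pvLin t).2 * q.2)

-- B's stride-building loop state, and the suffix-product characterisation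
def pvPref : List Int → Int → List Int
  | [], _ => []
  | g :: gs, a => a :: pvPref gs (a * g)

def pvStrides : List Int → List Int
  | [] => []
  | _ :: gs => gs.prod :: pvStrides gs

lemma range_getD_pair_nat : ∀ (xs ys : List Int), ys.length = xs.length →
    (List.range xs.length).map (fun k => (xs.getD k 0, ys.getD k 0)) = xs.zip ys := by
  intro xs
  induction xs with
  | nil => simp
  | cons x xs ih =>
    intro ys h
    cases ys with
    | nil => simp at h
    | cons y ys =>
      simp only [List.length_cons, List.range_succ_eq_map, List.map_cons, List.map_map]
      simp only [List.getD_cons_zero, List.zip_cons_cons]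
      congr 1
      have := ih ys (by simpa using h)
      simpa [Function.comp, Nat.succ_eq_add_one] using this

lemma map_range_getD_pair (xs ys : List Int) (n : Nat) (hx : xs.length = n) (hy : ys.length = n) :
    (PySem.List.pyRange 0 (n : Int)).map
      (fun i => (PySem.List.pyGetD xs i 0, PySem.List.pyGetD ys i 0)) = xs.zip ys := by
  subst hx
  rw [PySem.List.pyRange_zero_nat, List.map_map]
  have : ((fun i => (PySem.List.pyGetD xs i 0, PySem.List.pyGetD ys i 0)) ∘ fun k : Nat => (k : Int))
      = fun k : Nat => (xs.getD k 0, ys.getD k 0) := by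
    funext k; simp [PySem.List.pyGetD_natCast]
  rw [this, range_getD_pair_nat xs ys hy]

lemma map_range_getD₂ (f : Int → Int → Int) (xs ys : List Int) (n : Nat)
    (hx : xs.length = n) (hy : ys.length = n) :
    (PySem.List.pyRange 0 (n : Int)).map
      (fun i => f (PySem.List.pyGetD xs i 0) (PySem.List.pyGetD ys i 0))
    = (xs.zip ys).map (fun q => f q.1 q.2) := by
  rw [← map_range_getD_pair xs ys n hx hy, List.map_map]
  rfl

lemma any_range_getD₂ (p : Int → Int → Bool) (xs ys : List Int) (n : Nat)
    (hx : xs.length = n) (hy : ys.length = n) :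
    ((PySem.List.pyRange 0 (n : Int)).any
      (fun i => p (PySem.List.pyGetD xs i 0) (PySem.List.pyGetD ys i 0)))
    = (xs.zip ys).any (fun q => p q.1 q.2) := by
  rw [← map_range_getD_pair xs ys n hx hy, List.any_map]
  rfl

lemma foldr_range_getD₂ {β : Type} (F : Int → Int → β → β) (xs ys : List Int) (n : Nat)
    (hx : xs.length = n) (hy : ys.length = n) (init : β) :
    (PySem.List.pyRange 0 (n : Int)).foldr
      (fun i p => F (PySem.List.pyGetD xs i 0) (PySem.List.pyGetD ys i 0) p) init
    = (xs.zip ys).foldr (fun q p => F q.1 q.2 p) init := by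
  rw [← map_range_getD_pair xs ys n hx hy, List.foldr_map]

lemma pvLin_eq_foldr (l : List (Int × Int)) :
    l.foldr (fun q p => (p.1 + q.1 * p.2, p.2 * q.2)) ((0 : Int), (1 : Int)) = pvLin l := by
  induction l with
  | nil => rfl
  | cons q t ih => simp [pvLin, ih]

lemma pvLin_snd : ∀ (u v : List Int), v.length ≤ u.length → (pvLin (u.zip v)).2 = v.prod := by
  intro u
  induction u with
  | nil =>
    intro v h
    have hv : v = [] := List.length_eq_zero_iff.mp (Nat.le_zero.mp (by simpa using h))
    subst hv; simp [pvLin]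
  | cons x u ih =>
    intro v h
    cases v with
    | nil => simp [pvLin]
    | cons y v => simp [pvLin, ih v (by simpa using h), mul_comm]

lemma length_mem_pvProduct : ∀ (rs : List (List Int)) (off : List Int),
    off ∈ pvProduct rs → off.length = rs.length := by
  intro rs
  induction rs with
  | nil => intro off h; simp [pvProduct] at h; simp [h]
  | cons r rs ih =>
    intro off h
    simp only [pvProduct, List.mem_flatMap, List.mem_map] at h
    obtain ⟨x, _, t, ht, rfl⟩ := h
    simp [ih t ht]

lemma foldl_append_unless {α : Type} (l : List α) (p : α → Bool) (f : α → Int) (acc : List Int) :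
    l.foldl (fun acc x => if p x then acc else acc ++ [f x]) acc
    = acc ++ (l.filter (fun x => !p x)).map f := by
  induction l generalizing acc with
  | nil => simp
  | cons x l ih =>
    cases hx : p x <;> simp [List.foldl_cons, hx, ih]

lemma flatMap_range_clamp (c m : Int) (f : Int → List Int) :
    (PySem.List.pyRange 0 c).flatMap (fun x => if m ≤ x then [] else f x)
    = (PySem.List.pyRange 0 (min c m)).flatMap f := by
  rcases le_or_gt c m with h | h
  · rw [min_eq_left h]
    apply List.flatMap_congr
    intro x hx
    rw [PySem.List.mem_pyRange_one] at hx
    rw [if_neg (by omega)]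
  · rcases le_or_gt m 0 with hm | hm
    · rw [min_eq_right h.le, PySem.List.pyRange_one_eq_nil hm]
      simp only [List.flatMap_nil]
      apply List.flatMap_eq_nil_iff.mpr
      intro x hx
      rw [PySem.List.mem_pyRange_one] at hx
      rw [if_pos (by omega)]
    · rw [min_eq_right h.le]
      rw [PySem.List.pyRange_one_append 0 m c (by omega) (by omega), List.flatMap_append]
      have h1 : (PySem.List.pyRange 0 m).flatMap (fun x => if m ≤ x then [] else f x)
          = (PySem.List.pyRange 0 m).flatMap f := by
        apply List.flatMap_congr
        intro x hx
        rw [PySem.List.mem_pyRange_one] at hx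
        rw [if_neg (by omega)]
      have h2 : (PySem.List.pyRange m c).flatMap (fun x => if m ≤ x then ([] : List Int) else f x)
          = [] := by
        apply List.flatMap_eq_nil_iff.mpr
        intro x hx
        rw [PySem.List.mem_pyRange_one] at hx
        rw [if_pos (by omega)]
      rw [h1, h2, List.append_nil]

lemma A_main : ∀ (cps base grid : List Int), base.length = cps.length → grid.length = cps.length →
    ((pvProduct (cps.map (fun d => PySem.List.pyRange 0 d))).filter
        (fun off => !(((base.zip off).map (fun q => q.1 + q.2)).zip grid).any
            (fun q => decide (q.1 ≥ q.2)))).map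
        (fun off => (pvLin (((base.zip off).map (fun q => q.1 + q.2)).zip grid)).1)
    = gcore base cps grid := by
  intro cps
  induction cps with
  | nil =>
    intro base grid hb hg
    have hb' : base = [] := List.length_eq_zero_iff.mp (by simpa using hb)
    have hg' : grid = [] := List.length_eq_zero_iff.mp (by simpa using hg)
    subst hb'; subst hg'
    simp [pvProduct, pvLin, gcore]
  | cons c cs ih =>
    intro base grid hb hg
    cases base with
    | nil => simp at hb
    | cons b bs =>
    cases grid with
    | nil => simp at hg
    | cons g gs =>
    have hbs : bs.length = cs.length := by simpa using hb
    have hgs : gs.length = cs.length := by simpa using hg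
    simp only [List.map_cons, pvProduct, List.filter_flatMap, List.map_flatMap,
      List.filter_map, List.map_map]
    rw [show gcore (b :: bs) (c :: cs) (g :: gs)
        = (PySem.List.pyRange 0 (min c (g - b))).flatMap
            (fun x => (gcore bs cs gs).map (fun l => (b + x) * gs.prod + l)) from rfl]
    rw [← flatMap_range_clamp c (g - b) (fun x => (gcore bs cs gs).map (fun l => (b + x) * gs.prod + l))]
    apply List.flatMap_congr
    intro x _
    by_cases hx : (g - b) ≤ x
    · rw [if_pos hx]
      rw [List.filter_eq_nil_iff.mpr, List.map_nil]
      intro t _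
      simp only [Function.comp, List.zip_cons_cons, List.map_cons, List.any_cons]
      simp [show g ≤ b + x by omega]
    · rw [if_neg hx]
      have hfilter : ((pvProduct (cs.map (fun d => PySem.List.pyRange 0 d))).filter
            ((fun off => !((((b :: bs).zip off).map (fun q => q.1 + q.2)).zip (g :: gs)).any
                (fun q => decide (q.1 ≥ q.2))) ∘ (fun t => x :: t)))
          = ((pvProduct (cs.map (fun d => PySem.List.pyRange 0 d))).filter
            (fun off => !(((bs.zip off).map (fun q => q.1 + q.2)).zip gs).any
                (fun q => decide (q.1 ≥ q.2)))) := by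
        apply List.filter_congr
        intro t _
        simp only [Function.comp, List.zip_cons_cons, List.map_cons, List.any_cons, Bool.not_or]
        simp [show ¬ (g ≤ b + x) by omega]
      rw [hfilter]
      have hmap : ∀ t ∈ ((pvProduct (cs.map (fun d => PySem.List.pyRange 0 d))).filter
            (fun off => !(((bs.zip off).map (fun q => q.1 + q.2)).zip gs).any
                (fun q => decide (q.1 ≥ q.2)))),
          ((fun off => (pvLin ((((b :: bs).zip off).map (fun q => q.1 + q.2)).zip (g :: gs))).1) ∘ (fun t => x :: t)) t
          = (b + x) * gs.prod + (pvLin (((bs.zip t).map (fun q => q.1 + q.2)).zip gs)).1 := by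
        intro t ht
        have ht' := List.mem_of_mem_filter ht
        have hlen : t.length = cs.length := by
          have := length_mem_pvProduct _ _ ht'
          simpa using this
        have hsnd : (pvLin (((bs.zip t).map (fun q => q.1 + q.2)).zip gs)).2 = gs.prod := by
          apply pvLin_snd
          simp [hlen, hbs, hgs]
        simp only [Function.comp, List.zip_cons_cons, List.map_cons, pvLin, hsnd]
        ring
      rw [List.map_congr_left hmap]
      rw [show (fun t => (b + x) * gs.prod + (pvLin (((bs.zip t).map (fun q => q.1 + q.2)).zip gs)).1)
          = (fun l => (b + x) * gs.prod + l) ∘ (fun t => (pvLin (((bs.zip t).map (fun q => q.1 + q.2)).zip gs)).1) from rfl]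
      rw [← List.map_map]
      rw [ih bs gs hbs hgs]

lemma foldl_strides : ∀ (gs l0 : List Int) (a : Int),
    (gs.foldl (fun (p : List Int × Int) g => (p.1 ++ [p.2], p.2 * g)) (l0, a)).1
    = l0 ++ pvPref gs a := by
  intro gs
  induction gs with
  | nil => simp [pvPref]
  | cons g gs ih => intro l0 a; simp [List.foldl_cons, ih, pvPref]

lemma pvPref_append : ∀ (l l' : List Int) (a : Int),
    pvPref (l ++ l') a = pvPref l a ++ pvPref l' (a * l.prod) := by
  intro l
  induction l with
  | nil => simp [pvPref]
  | cons x l ih => intro l' a; simp [pvPref, ih, mul_assoc]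

lemma strides_eq : ∀ gs : List Int, (pvPref gs.reverse 1).reverse = pvStrides gs := by
  intro gs
  induction gs with
  | nil => simp [pvPref, pvStrides]
  | cons g gs ih =>
    simp only [List.reverse_cons, pvPref_append, pvStrides]
    simp [pvPref, ih, List.prod_reverse]

lemma Bfold_append : ∀ (zs : List (Int × Int)) (o1 o2 : List Int),
    zs.foldl (fun out q => out.flatMap (fun lin => (PySem.List.pyRange 0 q.1).map (fun off => lin + off * q.2))) (o1 ++ o2)
    = zs.foldl (fun out q => out.flatMap (fun lin => (PySem.List.pyRange 0 q.1).map (fun off => lin + off * q.2))) o1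
      ++ zs.foldl (fun out q => out.flatMap (fun lin => (PySem.List.pyRange 0 q.1).map (fun off => lin + off * q.2))) o2 := by
  intro zs
  induction zs with
  | nil => simp
  | cons z zs ih => intro o1 o2; simp only [List.foldl_cons, List.flatMap_append, ih]

lemma Bfold_nil : ∀ (zs : List (Int × Int)),
    zs.foldl (fun out q => out.flatMap (fun lin => (PySem.List.pyRange 0 q.1).map (fun off => lin + off * q.2))) [] = [] := by
  intro zs
  induction zs with
  | nil => rfl
  | cons z zs ih => simpa using ih

lemma Bfold_flatMap : ∀ (zs : List (Int × Int)) (out : List Int),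
    zs.foldl (fun out q => out.flatMap (fun lin => (PySem.List.pyRange 0 q.1).map (fun off => lin + off * q.2))) out
    = out.flatMap (fun lin =>
        zs.foldl (fun out q => out.flatMap (fun lin => (PySem.List.pyRange 0 q.1).map (fun off => lin + off * q.2))) [lin]) := by
  intro zs out
  induction out with
  | nil => simp [Bfold_nil]
  | cons x out ih =>
    have : x :: out = [x] ++ out := rfl
    rw [this, Bfold_append, ih]; simp

lemma Bfold_shift : ∀ (zs : List (Int × Int)) (a lin : Int),
    zs.foldl (fun out q => out.flatMap (fun lin => (PySem.List.pyRange 0 q.1).map (fun off => lin + off * q.2))) [a + lin]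
    = (zs.foldl (fun out q => out.flatMap (fun lin => (PySem.List.pyRange 0 q.1).map (fun off => lin + off * q.2))) [lin]).map (a + ·) := by
  intro zs
  induction zs with
  | nil => simp
  | cons z zs ih =>
    intro a lin
    simp only [List.foldl_cons, List.flatMap_cons, List.flatMap_nil, List.append_nil]
    rw [Bfold_flatMap zs, Bfold_flatMap zs ((PySem.List.pyRange 0 z.1).map (fun off => lin + off * z.2))]
    rw [List.flatMap_map, List.flatMap_map]
    rw [List.map_flatMap]
    apply List.flatMap_congr
    intro x _
    have h1 : a + lin + x * z.2 = a + (lin + x * z.2) := by ring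
    rw [h1, ih]

lemma B_main : ∀ (cps base grid : List Int), base.length = cps.length → grid.length = cps.length →
    (((cps.zip (grid.zip base)).map (fun p => min p.1 (p.2.1 - p.2.2))).zip (pvStrides grid)).foldl
      (fun out q => out.flatMap (fun lin => (PySem.List.pyRange 0 q.1).map (fun off => lin + off * q.2)))
      [((base.zip (pvStrides grid)).map (fun p => p.1 * p.2)).sum]
    = gcore base cps grid := by
  intro cps
  induction cps with
  | nil =>
    intro base grid hb hg
    have hb' : base = [] := List.length_eq_zero_iff.mp (by simpa using hb)
    have hg' : grid = [] := List.length_eq_zero_iff.mp (by simpa using hg)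
    subst hb'; subst hg'
    simp [gcore, pvStrides]
  | cons c cs ih =>
    intro base grid hb hg
    cases base with
    | nil => simp at hb
    | cons b bs =>
    cases grid with
    | nil => simp at hg
    | cons g gs =>
    simp only [List.zip_cons_cons, List.map_cons, pvStrides, List.foldl_cons, List.sum_cons]
    rw [List.flatMap_cons, List.flatMap_nil, List.append_nil]
    rw [Bfold_flatMap, List.flatMap_map]
    have key : ∀ off : Int,
        ((((cs.zip (gs.zip bs)).map (fun p => min p.1 (p.2.1 - p.2.2))).zip (pvStrides gs)).foldl
          (fun out q => out.flatMap (fun lin => (PySem.List.pyRange 0 q.1).map (fun off => lin + off * q.2)))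
          [b * gs.prod + ((bs.zip (pvStrides gs)).map (fun p => p.1 * p.2)).sum + off * gs.prod])
        = (gcore bs cs gs).map (fun l => (b + off) * gs.prod + l) := by
      intro off
      have h1 : b * gs.prod + ((bs.zip (pvStrides gs)).map (fun p => p.1 * p.2)).sum + off * gs.prod
          = (b + off) * gs.prod + ((bs.zip (pvStrides gs)).map (fun p => p.1 * p.2)).sum := by ring
      rw [h1, Bfold_shift, ih bs gs (by simpa using hb) (by simpa using hg)]
    rw [show (gcore (b :: bs) (c :: cs) (g :: gs))
        = (PySem.List.pyRange 0 (min c (g - b))).flatMap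
            (fun x => (gcore bs cs gs).map (fun l => (b + x) * gs.prod + l)) from rfl]
    exact List.flatMap_congr (fun x _ => key x)

lemma A_port_eq (sc ss cs cg : List Int) (h1 : sc.length = ss.length)
    (h2 : cs.length = ss.length) (h3 : cg.length = ss.length) :
    get_chunk_linear_indices_in_shard sc ss cs cg
    = ((pvProduct ((((ss.zip cs).map (fun p : Int × Int => PySem.Int.floordiv p.1 p.2))).map
          (fun d => PySem.List.pyRange 0 d))).filter
        (fun off => !(((((sc.zip ((ss.zip cs).map (fun p : Int × Int => PySem.Int.floordiv p.1 p.2))).map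
              (fun p : Int × Int => p.1 * p.2)).zip off).map (fun q : Int × Int => q.1 + q.2)).zip cg).any
            (fun q : Int × Int => decide (q.1 ≥ q.2)))).map
        (fun off => (pvLin (((((sc.zip ((ss.zip cs).map (fun p : Int × Int => PySem.Int.floordiv p.1 p.2))).map
              (fun p : Int × Int => p.1 * p.2)).zip off).map (fun q : Int × Int => q.1 + q.2)).zip cg)).1) := by
  set n := ss.length with hn
  simp only [get_chunk_linear_indices_in_shard]
  rw [map_range_getD₂ (fun a b => PySem.Int.floordiv a b) ss cs n rfl h2]
  set cps := (ss.zip cs).map (fun q => PySem.Int.floordiv q.1 q.2) with hcps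
  have hcl : cps.length = n := by simp [hcps, h2]; omega
  rw [h1, map_range_getD₂ (fun a b => a * b) sc cps n h1 hcl]
  set base := (sc.zip cps).map (fun q => q.1 * q.2) with hbase
  have hbl : base.length = n := by simp [hbase, h1, hcl]
  rw [PySem.List.foldl_congr_mem _ _
    (fun acc off =>
      if (((base.zip off).map (fun q => q.1 + q.2)).zip cg).any (fun q => decide (q.1 ≥ q.2))
      then acc
      else acc ++ [(pvLin (((base.zip off).map (fun q => q.1 + q.2)).zip cg)).1]) _ ?_]
  · rw [foldl_append_unless]
    simp only [List.nil_append]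
  · intro acc off hoff
    have hofflen : off.length = n := by
      have := length_mem_pvProduct _ _ hoff
      simpa [hcl] using this
    have hcoord := map_range_getD₂ (fun a b => a + b) base off n hbl hofflen
    rw [hbl, hcoord]
    set coord := (base.zip off).map (fun q => q.1 + q.2) with hcoordd
    have hcoordlen : coord.length = n := by simp [hcoordd, hbl, hofflen]
    rw [hcoordlen, any_range_getD₂ (fun a b => decide (a ≥ b)) coord cg n hcoordlen h3]
    rw [PySem.List.pyRange_neg_one_eq_reverse]
    rw [show (-1 : Int) + 1 = 0 from by ring, show ((n : Int) - 1) + 1 = (n : Int) from by ring]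
    rw [List.foldl_reverse]
    rw [foldr_range_getD₂ (fun a b p => (p.1 + a * p.2, p.2 * b)) coord cg n hcoordlen h3]
    rw [pvLin_eq_foldr]

lemma gcore_eq_nil : ∀ (cps base grid : List Int), base.length = cps.length → grid.length = cps.length →
    ((cps.zip (grid.zip base)).map (fun p => min p.1 (p.2.1 - p.2.2))).any (fun v => decide (v ≤ 0)) = true →
    gcore base cps grid = [] := by
  intro cps
  induction cps with
  | nil =>
    intro base grid hb hg h
    simp at h
  | cons c cs ih =>
    intro base grid hb hg h
    cases base with
    | nil => simp at hb
    | cons b bs =>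
    cases grid with
    | nil => simp at hg
    | cons g gs =>
    rw [show gcore (b :: bs) (c :: cs) (g :: gs)
        = (PySem.List.pyRange 0 (min c (g - b))).flatMap
            (fun x => (gcore bs cs gs).map (fun l => (b + x) * gs.prod + l)) from rfl]
    simp only [List.zip_cons_cons, List.map_cons, List.any_cons, Bool.or_eq_true,
      decide_eq_true_eq] at h
    rcases h with h | h
    · rw [PySem.List.pyRange_one_eq_nil (by omega), List.flatMap_nil]
    · rw [ih bs gs (by simpa using hb) (by simpa using hg) h]
      simp

lemma B_port_eq (sc ss cs cg : List Int) :
    get_chunk_linear_indices_in_shard_alt sc ss cs cg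
    = (if ((((ss.zip cs).map (fun p : Int × Int => PySem.Int.floordiv p.1 p.2)).zip
          (cg.zip ((sc.zip ((ss.zip cs).map (fun p : Int × Int => PySem.Int.floordiv p.1 p.2))).map
            (fun p : Int × Int => p.1 * p.2)))).map
          (fun p => min p.1 (p.2.1 - p.2.2))).any (fun v => decide (v ≤ 0)) then []
      else
        (((((ss.zip cs).map (fun p : Int × Int => PySem.Int.floordiv p.1 p.2)).zip
            (cg.zip ((sc.zip ((ss.zip cs).map (fun p : Int × Int => PySem.Int.floordiv p.1 p.2))).map
              (fun p : Int × Int => p.1 * p.2)))).map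
            (fun p => min p.1 (p.2.1 - p.2.2))).zip (pvStrides cg)).foldl
          (fun out q => out.flatMap (fun lin => (PySem.List.pyRange 0 q.1).map (fun off => lin + off * q.2)))
          [(((((sc.zip ((ss.zip cs).map (fun p : Int × Int => PySem.Int.floordiv p.1 p.2))).map
              (fun p : Int × Int => p.1 * p.2))).zip (pvStrides cg)).map (fun p : Int × Int => p.1 * p.2)).sum]) := by
  simp only [get_chunk_linear_indices_in_shard_alt]
  rw [foldl_strides, List.nil_append, strides_eq]

-- ===== VERDICT (by name: the statement is the Claim_ definition above) =====
theorem get_chunk_linear_indices_in_shard_spec : Claim_equal_get_chunk_linear_indices_in_shard := by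
  intro sc ss cs cg _hdom hpre
  obtain ⟨h1, h2, h3, _⟩ := hpre
  unfold Spec_get_chunk_linear_indices_in_shard
  have hcl : ((ss.zip cs).map (fun p : Int × Int => PySem.Int.floordiv p.1 p.2)).length = ss.length := by
    simp [h2]
  have hbl : ((sc.zip ((ss.zip cs).map (fun p : Int × Int => PySem.Int.floordiv p.1 p.2))).map
      (fun p : Int × Int => p.1 * p.2)).length
      = ((ss.zip cs).map (fun p : Int × Int => PySem.Int.floordiv p.1 p.2)).length := by
    simp [h1, h2]
  have hgl : cg.length = ((ss.zip cs).map (fun p : Int × Int => PySem.Int.floordiv p.1 p.2)).length := by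
    simp [h2, h3]
  rw [A_port_eq sc ss cs cg h1 h2 h3, B_port_eq sc ss cs cg]
  rw [A_main _ _ _ hbl hgl]
  by_cases hany : ((((ss.zip cs).map (fun p : Int × Int => PySem.Int.floordiv p.1 p.2)).zip
      (cg.zip ((sc.zip ((ss.zip cs).map (fun p : Int × Int => PySem.Int.floordiv p.1 p.2))).map
        (fun p : Int × Int => p.1 * p.2)))).map
      (fun p => min p.1 (p.2.1 - p.2.2))).any (fun v => decide (v ≤ 0)) = true
  · rw [if_pos hany, gcore_eq_nil _ _ _ hbl hgl hany]
  · rw [if_neg hany, B_main _ _ _ hbl hgl]
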